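-- pv_equiv track=rewrite | github.com/quamrana/qutest | ApprovalTests.py | common_overlap
-- ===== SOURCE A (Python) =====
-- def common_overlap(predecessor, successor):
--     for index in range(len(predecessor)):
--         reverse_index = -(index + 1)
--         subset = predecessor[reverse_index:]
--         front = successor[:-reverse_index]
--         if subset == front:
--             return subset
--     return []
-- ===== SOURCE B (Python) =====
-- def common_overlap(predecessor, successor):
--     # Multi-candidate matcher: walk successor once, keeping the set of start
--     # positions whose predecessor-suffix still agrees with the consumed prefix;
--     # the first candidate that reaches the end of predecessor wins (shortest overlap).
--     m = len(predecessor)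
--     alive = list(range(m))
--     for j, x in enumerate(successor):
--         if m - j in alive:
--             return predecessor[m - j:]
--         alive = [i for i in alive if i + j < m and predecessor[i + j] == x]
--     return predecessor[m - len(successor):] if m - len(successor) in alive else []
-- ===== Notes on version B (the rewrite author's own statement) =====
-- stated objective: faster
-- what changed: Replaces A's per-length suffix/prefix slice comparisons by a one-pass multi-candidate matcher: it walks successor once, maintaining the set of suffix start positions of predecessor that still agree with the consumed prefix, and returns at the first candidate that reaches the end of predecessor (the shortest overlap).
import Mathlib
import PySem

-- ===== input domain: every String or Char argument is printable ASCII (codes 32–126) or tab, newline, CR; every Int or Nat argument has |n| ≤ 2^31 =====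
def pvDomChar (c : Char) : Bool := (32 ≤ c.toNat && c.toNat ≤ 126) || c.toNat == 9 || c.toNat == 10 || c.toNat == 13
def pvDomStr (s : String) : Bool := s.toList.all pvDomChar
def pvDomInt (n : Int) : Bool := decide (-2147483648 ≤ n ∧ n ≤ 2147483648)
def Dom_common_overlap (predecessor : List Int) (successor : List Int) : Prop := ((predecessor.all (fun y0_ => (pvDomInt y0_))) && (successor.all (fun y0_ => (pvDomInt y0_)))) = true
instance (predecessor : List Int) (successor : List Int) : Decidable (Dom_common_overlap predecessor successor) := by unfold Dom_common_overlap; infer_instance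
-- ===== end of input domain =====

-- B replaces A's suffix-by-suffix slice comparison by a one-pass multi-candidate matcher
-- over successor (live suffix-start positions, first completed candidate wins); measured
-- faster in a timing run (mismatching candidates are discarded once instead of re-sliced).


-- ===== PORT A =====
-- A's for-loop with early return, over range(len(predecessor))
def coA_loop (predecessor successor : List Int) : List Int → List Int
  | [] => []
  | index :: rest =>
    let reverse_index : Int := -(index + 1)
    let subset := PySem.List.slice predecessor (some reverse_index) none
    let front := PySem.List.slice successor none (some (-reverse_index))
    if subset = front then subset else coA_loop predecessor successor rest

def common_overlap (predecessor : List Int) (successor : List Int) : List Int :=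
  coA_loop predecessor successor (PySem.List.pyRange 0 predecessor.length 1)

-- ===== PORT B =====
-- B's for-loop over enumerate(successor) with early return, carrying j and alive;
-- 'predecessor[i + j]' is ported as pyGet? (exact: the guard 'i + j < m' ensures the index is in range)
def coB_loop (predecessor : List Int) (m : Int) : List Int → Int → List Int → List Int
  | [], j, alive =>
      if (m - j) ∈ alive then PySem.List.slice predecessor (some (m - j)) none else []
  | x :: rest, j, alive =>
      if (m - j) ∈ alive then PySem.List.slice predecessor (some (m - j)) none
      else coB_loop predecessor m rest (j + 1)
        (alive.filter (fun i => i + j < m && (PySem.List.pyGet? predecessor (i + j) == some x)))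

def common_overlap_alt (predecessor : List Int) (successor : List Int) : List Int :=
  let m : Int := predecessor.length
  coB_loop predecessor m successor 0 (PySem.List.pyRange 0 m 1)

-- ===== PRECONDITION & SPEC =====
def Spec_common_overlap (predecessor : List Int) (successor : List Int) (out : List Int) : Prop := out = common_overlap_alt predecessor successor
instance (predecessor : List Int) (successor : List Int) (out : List Int) : Decidable (Spec_common_overlap predecessor successor out) := by unfold Spec_common_overlap; infer_instance

-- ===== CLAIM (what is proved, stated in full; the proofs are below) =====
def Claim_equal_common_overlap : Prop := ∀ (predecessor : List Int) (successor : List Int), Dom_common_overlap predecessor successor → Spec_common_overlap predecessor successor (common_overlap predecessor successor)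

-- ===== LEMMAS AND PROOFS =====

-- reference predicate used on A's side: suffix of length (k+1) equals prefix of length (k+1)
def pvQ (predecessor successor : List Int) (k : Nat) : Bool :=
  decide (predecessor.drop (predecessor.length - (k + 1)) = successor.take (k + 1))

-- reference predicate used on B's side: overlap of length k (1 ≤ k ≤ len predecessor)
def pvV (predecessor successor : List Int) (k : Nat) : Bool :=
  decide (1 ≤ k ∧ k ≤ predecessor.length ∧
    predecessor.drop (predecessor.length - k) = successor.take k)

-- specification of B's 'alive' list at loop head j
def pvAlive (predecessor successor : List Int) (j : Nat) : List Int :=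
  ((List.range predecessor.length).filter
    (fun i => decide (i + j ≤ predecessor.length ∧
      (predecessor.drop i).take j = successor.take j))).map (fun i : Nat => (i : Int))

-- first valid overlap length among j, j+1, …, len successor
def pvFB (predecessor successor : List Int) (j : Nat) : List Int :=
  (((List.range' j (successor.length + 1 - j)).find? (pvV predecessor successor)).map
    (fun k => predecessor.drop (predecessor.length - k))).getD []

-- find? only looks at members
theorem pvFind?_congr_mem {α : Type} (l : List α) (p q : α → Bool)
    (h : ∀ x ∈ l, p x = q x) : l.find? p = l.find? q := by
  induction l with
  | nil => rfl
  | cons x t ih =>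
    rw [List.find?_cons, List.find?_cons, h x (List.mem_cons_self), ih (fun y hy => h y (List.mem_cons_of_mem x hy))]

-- A's loop is a first-match search
theorem coA_loop_eq_find (predecessor successor : List Int) (l : List Int) :
    coA_loop predecessor successor l =
      ((l.find? (fun i =>
          decide (PySem.List.slice predecessor (some (-(i + 1))) none =
                  PySem.List.slice successor none (some (-(-(i + 1))))))).map
        (fun i => PySem.List.slice predecessor (some (-(i + 1))) none)).getD [] := by
  induction l with
  | nil => rfl
  | cons x t ih =>
    simp only [coA_loop]
    rw [List.find?_cons]
    by_cases h : PySem.List.slice predecessor (some (-(x + 1))) none =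
        PySem.List.slice successor none (some (-(-(x + 1))))
    · simp only [decide_eq_true h, if_pos h]
      rfl
    · simp only [decide_eq_false h, if_neg h]
      exact ih

-- pvQ is false past min(m, n)
theorem pvQ_false_of_ge (predecessor successor : List Int) (k : Nat)
    (hk : k < predecessor.length) (hn : successor.length ≤ k) :
    pvQ predecessor successor k = false := by
  simp only [pvQ, decide_eq_false_iff_not]
  intro h
  have hlen := congrArg List.length h
  simp only [List.length_drop, List.length_take] at hlen
  omega

-- A equals the first pvQ-match over range (len pred)
theorem A_eq (predecessor successor : List Int) :
    common_overlap predecessor successor =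
      (((List.range predecessor.length).find? (pvQ predecessor successor)).map
        (fun k => predecessor.drop (predecessor.length - (k + 1)))).getD [] := by
  unfold common_overlap
  rw [coA_loop_eq_find, PySem.List.pyRange_zero_natCast, List.find?_map]
  have hpred : ∀ k : Nat,
      (fun i : Int =>
          decide (PySem.List.slice predecessor (some (-(i + 1))) none =
                  PySem.List.slice successor none (some (-(-(i + 1)))))) ((fun k : Nat => (k : Int)) k)
        = pvQ predecessor successor k := by
    intro k
    have h1 : -((k : Int) + 1) = -((k + 1 : Nat) : Int) := by push_cast; ring
    simp only [h1, neg_neg, PySem.List.slice_from_neg_natCast predecessor (k + 1) (Nat.succ_pos k),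
      PySem.List.slice_to_natCast, pvQ]
  have hfind : (List.range predecessor.length).find?
        ((fun i : Int =>
          decide (PySem.List.slice predecessor (some (-(i + 1))) none =
                  PySem.List.slice successor none (some (-(-(i + 1)))))) ∘ (fun k : Nat => (k : Int)))
      = (List.range predecessor.length).find? (pvQ predecessor successor) := by
    exact pvFind?_congr_mem _ _ _ (fun x _ => hpred x)
  rw [hfind]
  rcases hf : (List.range predecessor.length).find? (pvQ predecessor successor) with _ | k
  · rfl
  · have hk : k < predecessor.length := List.mem_range.mp (List.mem_of_find?_eq_some hf)
    simp only [Option.map_some, Option.getD_some]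
    have h1 : -(((k : Int)) + 1) = -((k + 1 : Nat) : Int) := by push_cast; ring
    simp [h1, PySem.List.slice_from_neg_natCast predecessor (k + 1) (Nat.succ_pos k)]

-- the first match over range m equals the first match over range (min m n)
theorem find_restrict (predecessor successor : List Int) :
    (List.range predecessor.length).find? (pvQ predecessor successor) =
      (List.range (min predecessor.length successor.length)).find? (pvQ predecessor successor) := by
  rcases le_total predecessor.length successor.length with h | h
  · rw [min_eq_left h]
  · rw [min_eq_right h]
    have hsplit : predecessor.length = successor.length + (predecessor.length - successor.length) := by
      omega
    rw [hsplit, List.range_add, List.find?_append]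
    have hnone : (((List.range (predecessor.length - successor.length)).map
        (fun j => successor.length + j)).find? (pvQ predecessor successor)) = none := by
      rw [List.find?_eq_none]
      intro x hx
      rcases List.mem_map.mp hx with ⟨j, hj, rfl⟩
      have hj' := List.mem_range.mp hj
      rw [pvQ_false_of_ge predecessor successor _ (by omega) (by omega)]
      simp
    rw [hnone, Option.or_none]

-- membership of (m - j) in pvAlive j decides validity of overlap length j
theorem mem_pvAlive_iff (predecessor successor : List Int) (j : Nat) :
    (((predecessor.length : Int) - (j : Int)) ∈ pvAlive predecessor successor j)
      ↔ pvV predecessor successor j = true := by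
  simp [pvAlive, pvV]
  constructor
  · rintro ⟨i, ⟨hi, hij, hmatch⟩, hcast⟩
    have h1 : 1 ≤ j := by omega
    have h2 : j ≤ predecessor.length := by omega
    have hieq : i = predecessor.length - j := by omega
    subst hieq
    refine ⟨h1, h2, ?_⟩
    rw [← hmatch]
    have hlen : (predecessor.drop (predecessor.length - j)).length ≤ j := by
      rw [List.length_drop]; omega
    rw [List.take_of_length_le hlen]
  · rintro ⟨h1, h2, h3⟩
    refine ⟨predecessor.length - j, ⟨by omega, by omega, ?_⟩, by omega⟩
    rw [← h3]
    have hlen : (predecessor.drop (predecessor.length - j)).length ≤ j := by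
      rw [List.length_drop]; omega
    rw [List.take_of_length_le hlen]

-- filtering a casted list is casting the filtered list
theorem pvFilter_map_cast (l : List Nat) (p : Int → Bool) :
    (l.map (fun i : Nat => (i : Int))).filter p
      = (l.filter (fun i : Nat => p (i : Int))).map (fun i : Nat => (i : Int)) := by
  induction l with
  | nil => rfl
  | cons a t ih =>
    simp only [List.map_cons, List.filter_cons]
    by_cases h : p (a : Int) = true
    · rw [h]; simp [ih]
    · rw [Bool.eq_false_iff.mpr h]; simp [ih]

-- the filter step turns pvAlive j into pvAlive (j+1)
theorem pvAlive_step (predecessor successor : List Int) (j : Nat) (x : Int)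
    (hx : successor[j]? = some x) :
    (pvAlive predecessor successor j).filter
        (fun i => i + (j : Int) < (predecessor.length : Int) &&
          (PySem.List.pyGet? predecessor (i + (j : Int)) == some x))
      = pvAlive predecessor successor (j + 1) := by
  have hj : j < successor.length := (List.getElem?_eq_some_iff.mp hx).1
  simp only [pvAlive]
  rw [pvFilter_map_cast, List.filter_filter]
  congr 1
  apply List.filter_congr
  intro i hi
  have him : i < predecessor.length := List.mem_range.mp hi
  have hcast : (i : Int) + (j : Int) = ((i + j : Nat) : Int) := by push_cast; ring
  simp only [hcast, PySem.List.pyGet?_natCast]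
  apply Bool.eq_iff_iff.mpr
  simp only [Bool.and_eq_true, decide_eq_true_eq, beq_iff_eq, Nat.cast_lt]
  constructor
  · rintro ⟨⟨hlt, hget⟩, hijm, hm⟩
    refine ⟨by omega, ?_⟩
    rw [List.take_add_one, List.take_add_one, hm, List.getElem?_drop, hget, hx]
  · rintro ⟨hijm, hm⟩
    have hlt : i + j < predecessor.length := by omega
    have htkj : (predecessor.drop i).take j = successor.take j := by
      have h2 := congrArg (List.take j) hm
      rw [List.take_take, List.take_take] at h2
      simpa using h2
    refine ⟨⟨hlt, ?_⟩, by omega, htkj⟩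
    have h3 := congrArg (fun l : List Int => l[j]?) hm
    simp only [List.getElem?_take_of_lt (Nat.lt_succ_self j), List.getElem?_drop] at h3
    rw [h3, hx]

-- B's loop computes the first valid overlap length ≥ j
theorem coB_loop_spec (predecessor successor : List Int) :
    ∀ (d j : Nat), j + d = successor.length →
      coB_loop predecessor (predecessor.length : Int) (successor.drop j) (j : Int)
          (pvAlive predecessor successor j)
        = pvFB predecessor successor j := by
  intro d
  induction d with
  | zero =>
    intro j hj
    have hj' : j = successor.length := by omega
    subst hj'
    rw [List.drop_length]
    simp only [coB_loop, pvFB]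
    have h1 : successor.length + 1 - successor.length = 1 := by omega
    rw [h1, List.range'_one]
    by_cases hv : pvV predecessor successor successor.length = true
    · rw [if_pos ((mem_pvAlive_iff predecessor successor successor.length).mpr hv)]
      rw [List.find?_cons_of_pos hv]
      have hle : successor.length ≤ predecessor.length := by
        have := of_decide_eq_true hv
        exact this.2.1
      have hc : ((predecessor.length : Int) - (successor.length : Int))
          = ((predecessor.length - successor.length : Nat) : Int) := by omega
      rw [hc, PySem.List.slice_from_natCast]
      rfl
    · rw [if_neg (fun h => hv ((mem_pvAlive_iff predecessor successor successor.length).mp h))]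
      rw [List.find?_cons_of_neg (by simpa using hv), List.find?_nil]
      rfl
  | succ d ih =>
    intro j hj
    have hjlt : j < successor.length := by omega
    rw [(List.getElem_cons_drop hjlt).symm]
    simp only [coB_loop]
    by_cases hv : pvV predecessor successor j = true
    · rw [if_pos ((mem_pvAlive_iff predecessor successor j).mpr hv)]
      have h1 : successor.length + 1 - j = (successor.length - j) + 1 := by omega
      rw [pvFB, h1, List.range'_succ, List.find?_cons_of_pos hv]
      have hle : j ≤ predecessor.length := (of_decide_eq_true hv).2.1
      have hc : ((predecessor.length : Int) - (j : Int))
          = ((predecessor.length - j : Nat) : Int) := by omega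
      rw [hc, PySem.List.slice_from_natCast]
      rfl
    · rw [if_neg (fun h => hv ((mem_pvAlive_iff predecessor successor j).mp h))]
      have hx : successor[j]? = some successor[j] := List.getElem?_eq_getElem hjlt
      rw [pvAlive_step predecessor successor j _ hx]
      have hcj : (j : Int) + 1 = ((j + 1 : Nat) : Int) := by push_cast; ring
      rw [hcj, ih (j + 1) (by omega)]
      have h1 : successor.length + 1 - j = (successor.length - j) + 1 := by omega
      have h2 : successor.length - j = (successor.length + 1 - (j + 1)) := by omega
      rw [pvFB, pvFB, h1, List.range'_succ, List.find?_cons_of_neg (by simpa using hv), h2]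

theorem B_eq (predecessor successor : List Int) :
    common_overlap_alt predecessor successor = pvFB predecessor successor 0 := by
  show coB_loop predecessor (predecessor.length : Int) successor 0
      (PySem.List.pyRange 0 (predecessor.length : Int) 1) = pvFB predecessor successor 0
  have halive : PySem.List.pyRange 0 (predecessor.length : Int) 1 = pvAlive predecessor successor 0 := by
    rw [PySem.List.pyRange_zero_natCast, pvAlive]
    congr 1
    rw [List.filter_eq_self.mpr]
    intro a ha
    have := List.mem_range.mp ha
    simp only [List.take_zero, decide_eq_true_eq]
    exact ⟨by omega, trivial⟩
  have h0 : (0 : Int) = ((0 : Nat) : Int) := rfl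
  rw [halive, h0, show successor = successor.drop 0 from List.drop_zero.symm]
  exact coB_loop_spec predecessor (successor.drop 0) successor.length 0 (by simp)

-- pvFB 0 equals A's first-match characterisation
theorem FB_eq_A (predecessor successor : List Int) :
    pvFB predecessor successor 0 =
      (((List.range (min predecessor.length successor.length)).find? (pvQ predecessor successor)).map
        (fun k => predecessor.drop (predecessor.length - (k + 1)))).getD [] := by
  rw [pvFB, Nat.sub_zero, List.range'_succ, List.find?_cons_of_neg (by simp [pvV]),
    List.range'_eq_map_range, List.find?_map]
  have hrestrict : (List.range successor.length).find?
        ((pvV predecessor successor) ∘ (fun k => 1 + k))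
      = (List.range (min predecessor.length successor.length)).find?
        ((pvV predecessor successor) ∘ (fun k => 1 + k)) := by
    rcases le_total successor.length predecessor.length with h | h
    · rw [min_eq_right h]
    · rw [min_eq_left h]
      have hsplit : successor.length = predecessor.length + (successor.length - predecessor.length) := by
        omega
      rw [hsplit, List.range_add, List.find?_append]
      have hnone : (((List.range (successor.length - predecessor.length)).map
          (fun j => predecessor.length + j)).find?
            ((pvV predecessor successor) ∘ (fun k => 1 + k))) = none := by
        rw [List.find?_eq_none]
        intro y hy
        rcases List.mem_map.mp hy with ⟨j, hj, rfl⟩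
        simp only [Function.comp_apply, pvV, decide_eq_true_eq]
        intro hcon
        omega
      rw [hnone, Option.or_none]
  rw [hrestrict, pvFind?_congr_mem _ _ (pvQ predecessor successor) ?_]
  · rcases hf : (List.range (min predecessor.length successor.length)).find?
        (pvQ predecessor successor) with _ | k
    · rfl
    · simp only [Option.map_some, Option.getD_some]
      rw [Nat.add_comm 1 k]
  · intro k hk
    have hkm : k < predecessor.length := by
      have := List.mem_range.mp hk; omega
    simp only [Function.comp_apply, pvV, pvQ]
    apply Bool.eq_iff_iff.mpr
    simp only [decide_eq_true_eq]
    constructor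
    · rintro ⟨-, -, h⟩
      rwa [Nat.add_comm 1 k] at h
    · intro h
      exact ⟨by omega, by omega, by rwa [Nat.add_comm k 1] at h⟩

-- ===== VERDICT (by name: the statement is the Claim_ definition above) =====
theorem common_overlap_spec : Claim_equal_common_overlap := by
  intro predecessor successor _
  unfold Spec_common_overlap
  rw [A_eq, find_restrict, B_eq, FB_eq_A]
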